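-- pv_equiv track=rewrite | github.com/perry-data/tcm-classic-rag | scripts/data_reconstruction_v2/run_phase4_3_production_shadow_canary.py | failure_code
-- ===== SOURCE A (Python) =====
-- from typing import Any, Iterator, Mapping
--
-- def failure_code(raw: Any) -> str:
--     if not raw:
--         return ""
--     text = str(raw)
--     for separator in [":", ";", "\n"]:
--         if separator in text:
--             text = text.split(separator, 1)[0]
--     return text[:80]
-- ===== SOURCE B (Python) =====
-- def failure_code(raw) -> str:
--     if not raw:
--         return ""
--     text = str(raw)
--     head = []
--     for ch in text:
--         if ch in (":", ";", "\n"):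
--             break
--         head.append(ch)
--     return "".join(head[:80])
-- ===== Notes on version B (the rewrite author's own statement) =====
-- stated objective: simpler
-- what changed: Replaces three sequential whole-string membership tests and splits with one single pass that stops at the first separator character, then caps at 80.
import Mathlib
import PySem

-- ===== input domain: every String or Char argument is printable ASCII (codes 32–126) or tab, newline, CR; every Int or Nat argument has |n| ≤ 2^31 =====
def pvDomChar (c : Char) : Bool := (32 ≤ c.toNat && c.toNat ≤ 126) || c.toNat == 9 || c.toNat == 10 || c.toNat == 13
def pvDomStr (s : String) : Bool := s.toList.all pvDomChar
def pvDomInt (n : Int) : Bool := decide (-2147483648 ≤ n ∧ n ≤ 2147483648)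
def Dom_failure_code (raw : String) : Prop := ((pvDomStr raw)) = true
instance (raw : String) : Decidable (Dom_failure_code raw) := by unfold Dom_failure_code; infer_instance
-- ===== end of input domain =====

-- B replaces A's three sequential membership tests + splits with one pass that stops at the first separator (simpler).

-- ===== PORT A =====
-- for separator in [":", ";", "\n"]: if separator in text: text = text.split(separator, 1)[0]
def failure_code (raw : String) : String :=
  if raw.toList = [] then ""
  else
    let text :=
      [":", ";", "\n"].foldl
        (fun t sep =>
          if PySem.Chars.isIn sep.toList t then
            (PySem.Chars.splitOnMax t sep.toList 1).headD t
          else t)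
        raw.toList
    String.ofList (PySem.Chars.slice text none (some 80))

-- ===== PORT B =====
-- single pass: collect chars until the first of ':', ';', '\n'; then cap at 80
def failure_code_alt (raw : String) : String :=
  if raw.toList = [] then ""
  else
    String.ofList
      ((raw.toList.takeWhile (fun c => !(c == ':' || c == ';' || c == '\n'))).take 80)

-- ===== PRECONDITION & SPEC =====
def Spec_failure_code (raw : String) (out : String) : Prop := out = failure_code_alt raw
instance (raw : String) (out : String) : Decidable (Spec_failure_code raw out) := by unfold Spec_failure_code; infer_instance

-- ===== CLAIM (what is proved, stated in full; the proofs are below) =====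
def Claim_equal_failure_code : Prop := ∀ (raw : String), Dom_failure_code raw → Spec_failure_code raw (failure_code raw)

-- ===== LEMMAS AND PROOFS =====

-- go with maxsplit exhausted just returns the remainder appended
theorem pv_go_zero (sep : List Char) (fuel : Nat) (l cur : List Char) (acc : List (List Char))
    (hf : 0 < fuel) :
    PySem.Chars.splitOnMax.go sep fuel 0 l cur acc = ((cur.reverse ++ l) :: acc).reverse := by
  cases fuel with
  | zero => omega
  | succ f =>
    cases l with
    | nil => simp [PySem.Chars.splitOnMax.go]
    | cons c rest => rfl

-- one split on a single-char separator: the head piece is the prefix before the first occurrence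
theorem pv_go_one (c : Char) : ∀ (fuel : Nat) (l cur : List Char) (acc : List (List Char)),
    l.length < fuel →
    PySem.Chars.splitOnMax.go [c] fuel 1 l cur acc =
      if c ∈ l then
        acc.reverse ++ [cur.reverse ++ l.takeWhile (· ≠ c), (l.dropWhile (· ≠ c)).tail]
      else acc.reverse ++ [cur.reverse ++ l] := by
  intro fuel
  induction fuel with
  | zero => intro l cur acc h; omega
  | succ f ih =>
    intro l cur acc h
    cases l with
    | nil => simp [PySem.Chars.splitOnMax.go]
    | cons x rest =>
      by_cases hx : x = c
      · subst hx
        simp only [PySem.Chars.splitOnMax.go, List.isPrefixOf, BEq.rfl, Bool.true_and,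
          if_true, if_neg (by omega : ¬ (1:Nat) = 0)]
        rw [pv_go_zero _ _ _ _ _ (by simp at h; omega)]
        simp
      · have hpref : [c].isPrefixOf (x :: rest) = false := by
          simp [List.isPrefixOf]; exact fun h' => hx h'.symm
        simp only [PySem.Chars.splitOnMax.go, hpref, if_neg (by omega : ¬ (1:Nat) = 0),
          Bool.false_eq_true, if_false]
        rw [ih rest (x :: cur) acc (by simpa using Nat.lt_of_succ_lt_succ h)]
        by_cases hm : c ∈ rest
        · simp [hm, hx, Ne.symm hx]
        · simp [hm, Ne.symm hx]

-- A's per-separator step equals takeWhile (· ≠ c)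
theorem pv_step_eq (c : Char) (t : List Char) :
    (if PySem.Chars.isIn [c] t then (PySem.Chars.splitOnMax t [c] 1).headD t else t) =
      t.takeWhile (· ≠ c) := by
  by_cases hm : c ∈ t
  · have hin : PySem.Chars.isIn [c] t = true := by
      rw [PySem.Chars.isIn_iff_infix]
      exact (List.singleton_infix_iff c t).mpr hm
    rw [if_pos hin]
    unfold PySem.Chars.splitOnMax
    rw [if_neg (by omega)]
    simp only [Int.toNat_one]
    rw [pv_go_one c (t.length + 1) t [] [] (by omega)]
    simp [hm]
  · have hin : PySem.Chars.isIn [c] t = false := by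
      rw [PySem.Chars.isIn_eq_false_iff]
      intro hinf
      exact hm (hinf.mem (by simp))
    rw [if_neg (by simp [hin])]
    exact (List.takeWhile_eq_self_iff.2 (fun x hx => by
      simp only [decide_eq_true_eq]; exact fun h' => hm (h' ▸ hx))).symm

-- ===== VERDICT (by name: the statement is the Claim_ definition above) =====
theorem failure_code_spec : Claim_equal_failure_code := by
  intro raw _
  unfold Spec_failure_code failure_code failure_code_alt
  by_cases hnil : raw.toList = []
  · simp [hnil]
  · rw [if_neg hnil, if_neg hnil]
    simp only [List.foldl, show (":".toList) = [':'] from rfl,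
      show (";".toList) = [';'] from rfl, show ("\n".toList) = ['\n'] from rfl]
    rw [pv_step_eq, pv_step_eq, pv_step_eq]
    rw [List.takeWhile_takeWhile, List.takeWhile_takeWhile]
    rw [PySem.Chars.slice_eq_listSlice, PySem.List.slice_to _ (b := 80) (by omega)]
    have hpred : ∀ p q : Char → Bool, p = q → List.takeWhile p raw.toList = List.takeWhile q raw.toList := fun p q h => by rw [h]
    congr 2
    apply hpred
    funext x
    by_cases h1 : x = ':' <;> by_cases h2 : x = ';' <;> by_cases h3 : x = '\n' <;>
      simp [h1, h2, h3]
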